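-- pv_equiv track=rewrite | github.com/JhonDenardFirme/CVITX_API | api/analysis/engine.py | compute_region_part_maps
-- ===== SOURCE A (Python) =====
-- from typing import Dict, List, Tuple, Optional, Any, Sequence
--
-- _LIGHT_FIX = {
--     "HeadLight":"Headlight","LeftHeadLight":"LeftHeadlight","RightHeadLight":"RightHeadlight",
--     "TailLight":"Taillight","LeftTailLight":"LeftTaillight","RightTailLight":"RightTaillight",
-- }
--
-- def _canon_part(p:str)->str: return _LIGHT_FIX.get(p,p)
--
-- def compute_region_part_maps(per_type_pairs: Dict[str, List[Tuple[str, str]]]):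
--     type_region_to_parts, type_part_to_regions = {}, {}
--     for vtype, pairs in (per_type_pairs or {}).items():
--         reg2parts, part2regs = {}, {}
--         for part, region in pairs:
--             pp = _canon_part(part)
--             reg2parts.setdefault(region, set()).add(pp)
--             part2regs.setdefault(pp, set()).add(region)
--         type_region_to_parts[vtype] = reg2parts
--         type_part_to_regions[vtype] = part2regs
--     return type_region_to_parts, type_part_to_regions
-- ===== SOURCE B (Python) =====
-- _LIGHT_FIX = {
--     "HeadLight":"Headlight","LeftHeadLight":"LeftHeadlight","RightHeadLight":"RightHeadlight",
--     "TailLight":"Taillight","LeftTailLight":"LeftTaillight","RightTailLight":"RightTaillight",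
-- }
--
-- def compute_region_part_maps(per_type_pairs):
--     type_region_to_parts, type_part_to_regions = {}, {}
--     for vtype, pairs in (per_type_pairs or {}).items():
--         cpairs = [(_LIGHT_FIX.get(p, p), r) for p, r in pairs]
--         regions = list(dict.fromkeys(r for _, r in cpairs))
--         parts = list(dict.fromkeys(p for p, _ in cpairs))
--         type_region_to_parts[vtype] = {
--             r: set(p for p, rr in cpairs if rr == r) for r in regions}
--         type_part_to_regions[vtype] = {
--             p: set(r for pp, r in cpairs if pp == p) for p in parts}
--     return type_region_to_parts, type_part_to_regions
-- ===== Notes on version B (the rewrite author's own statement) =====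
-- stated objective: alternative
-- what changed: B canonicalizes each type's pairs once, computes the distinct regions/parts, and builds each map by a group-by dict comprehension (per key a filtered scan of the canonical pairs), instead of A's single pass that mutates both dicts simultaneously with setdefault().add().
import Mathlib
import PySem

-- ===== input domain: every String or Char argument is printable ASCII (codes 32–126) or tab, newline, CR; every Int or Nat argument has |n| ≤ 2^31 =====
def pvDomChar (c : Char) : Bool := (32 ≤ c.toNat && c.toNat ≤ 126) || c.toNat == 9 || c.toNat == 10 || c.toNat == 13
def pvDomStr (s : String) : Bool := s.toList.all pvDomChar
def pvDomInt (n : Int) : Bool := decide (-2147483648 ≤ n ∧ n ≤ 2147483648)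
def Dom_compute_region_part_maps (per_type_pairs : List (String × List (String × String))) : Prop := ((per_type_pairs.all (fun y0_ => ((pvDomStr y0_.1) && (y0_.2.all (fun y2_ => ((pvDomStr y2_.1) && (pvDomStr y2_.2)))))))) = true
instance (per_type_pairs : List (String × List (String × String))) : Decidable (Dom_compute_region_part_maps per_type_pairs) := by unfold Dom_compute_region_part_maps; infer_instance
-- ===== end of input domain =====

-- B builds each per-type map by a two-phase group-by (canonicalize once, dedup the keys,
-- then a filtered scan per key) instead of A's single pass mutating both dicts with
-- setdefault().add(); objective: alternative decomposition (not faster).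

-- shared module-level constant _LIGHT_FIX and helper _canon_part (identical in Source A and Source B)
def lightFix : PySem.Dict String String := PySem.Dict.ofList
  [("HeadLight","Headlight"),("LeftHeadLight","LeftHeadlight"),("RightHeadLight","RightHeadlight"),
   ("TailLight","Taillight"),("LeftTailLight","LeftTaillight"),("RightTailLight","RightTaillight")]

def canonPart (p : String) : String := (lightFix.get? p).getD p   -- _LIGHT_FIX.get(p, p)

-- ===== PORT A =====
-- A's inner loop over one type's pairs: simultaneously grows reg2parts and part2regs
-- (setdefault(k, set()).add(x) is Dict.modify k Set.empty (Set.add · x))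
def innerA (pairs : List (String × String)) :
    PySem.Dict String (PySem.Set String) × PySem.Dict String (PySem.Set String) :=
  pairs.foldl (fun st pr =>
      let pp := canonPart pr.1
      (st.1.modify pr.2 PySem.Set.empty (fun s => PySem.Set.add s pp),
       st.2.modify pp PySem.Set.empty (fun s => PySem.Set.add s pr.2)))
    (PySem.Dict.empty, PySem.Dict.empty)

def compute_region_part_maps (per_type_pairs : List (String × List (String × String))) : (List (String × List (String × List String))) × (List (String × List (String × List String))) :=
  let st := per_type_pairs.foldl (fun st vp =>
      let m := innerA vp.2
      (st.1.insert vp.1 m.1.items, st.2.insert vp.1 m.2.items))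
    ((PySem.Dict.empty : PySem.Dict String (List (String × List String))),
     (PySem.Dict.empty : PySem.Dict String (List (String × List String))))
  (st.1.items, st.2.items)

-- ===== PORT B =====
-- B's inner computation: canonicalize the pairs once, dedup keys, group by a filtered scan
def innerB (pairs : List (String × String)) :
    (List (String × List String)) × (List (String × List String)) :=
  let cpairs := pairs.map (fun pr => (canonPart pr.1, pr.2))
  let regions := PySem.List.dedup (cpairs.map (fun c => c.2))
  let parts := PySem.List.dedup (cpairs.map (fun c => c.1))
  (regions.map (fun r => (r, PySem.Set.ofList ((cpairs.filter (fun c => c.2 == r)).map (fun c => c.1)))),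
   parts.map (fun p => (p, PySem.Set.ofList ((cpairs.filter (fun c => c.1 == p)).map (fun c => c.2)))))

def compute_region_part_maps_alt (per_type_pairs : List (String × List (String × String))) : (List (String × List (String × List String))) × (List (String × List (String × List String))) :=
  let st := per_type_pairs.foldl (fun st vp =>
      let m := innerB vp.2
      (st.1.insert vp.1 m.1, st.2.insert vp.1 m.2))
    ((PySem.Dict.empty : PySem.Dict String (List (String × List String))),
     (PySem.Dict.empty : PySem.Dict String (List (String × List String))))
  (st.1.items, st.2.items)

-- ===== PRECONDITION & SPEC =====
def Spec_compute_region_part_maps (per_type_pairs : List (String × List (String × String))) (out : (List (String × List (String × List String))) × (List (String × List (String × List String)))) : Prop := out = compute_region_part_maps_alt per_type_pairs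
instance (per_type_pairs : List (String × List (String × String))) (out : (List (String × List (String × List String))) × (List (String × List (String × List String)))) : Decidable (Spec_compute_region_part_maps per_type_pairs out) := by unfold Spec_compute_region_part_maps; infer_instance

-- ===== CLAIM (what is proved, stated in full; the proofs are below) =====
def Claim_equal_compute_region_part_maps : Prop := ∀ (per_type_pairs : List (String × List (String × String))), Dom_compute_region_part_maps per_type_pairs → Spec_compute_region_part_maps per_type_pairs (compute_region_part_maps per_type_pairs)

-- ===== LEMMAS AND PROOFS =====

-- the value a setdefault/add grouping fold leaves at key c: the old set updated with the
-- filtered values, in encounter order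
theorem getD_foldl_modify_setadd {α : Type} (k v : α → String) :
    ∀ (l : List α) (d : PySem.Dict String (PySem.Set String)) (c : String),
    (l.foldl (fun d x => d.modify (k x) PySem.Set.empty (fun s => PySem.Set.add s (v x))) d).getD c PySem.Set.empty
      = PySem.Set.update (d.getD c PySem.Set.empty) ((l.filter (fun x => k x == c)).map v) := by
  intro l
  induction l with
  | nil => intro d c; simp [PySem.Set.update_nil]
  | cons x t ih =>
    intro d c
    simp only [List.foldl_cons, List.filter_cons]
    rw [ih]
    by_cases hc : c = k x
    · subst hc
      simp [PySem.Set.update_cons]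
    · have : (k x == c) = false := by simpa using fun h => hc h.symm
      simp [PySem.Dict.getD_modify, hc, this]

-- one side of the inner grouping fold, characterized as B's group-by list
theorem items_foldl_modify_setadd {α : Type} (k v : α → String) (l : List α) :
    (l.foldl (fun d x => d.modify (k x) PySem.Set.empty (fun s => PySem.Set.add s (v x))) PySem.Dict.empty).items
      = (PySem.Set.ofList (l.map k)).map
          (fun c => (c, PySem.Set.ofList ((l.filter (fun x => k x == c)).map v))) := by
  have hnd : (l.foldl (fun d x => d.modify (k x) PySem.Set.empty (fun s => PySem.Set.add s (v x))) PySem.Dict.empty).keys.Nodup :=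
    PySem.Dict.nodup_keys_foldl_modify_key l k PySem.Set.empty (fun _ x => fun s => PySem.Set.add s (v x)) PySem.Dict.empty (by simp)
  rw [PySem.Dict.items_eq_map_keys _ hnd PySem.Set.empty]
  rw [PySem.Dict.keys_foldl_modify_key l k PySem.Set.empty (fun _ x => fun s => PySem.Set.add s (v x)) PySem.Dict.empty]
  have hkeys : PySem.Set.update (PySem.Dict.empty : PySem.Dict String (PySem.Set String)).keys (l.map k) = PySem.Set.ofList (l.map k) := by
    simp [PySem.Dict.keys_empty, PySem.Set.update_nil_left]
  rw [hkeys]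
  apply List.map_congr_left
  intro c _
  rw [getD_foldl_modify_setadd k v l PySem.Dict.empty c]
  simp [PySem.Dict.getD_empty, PySem.Set.update_nil_left]

theorem innerA_fst_items (pairs : List (String × String)) : (innerA pairs).1.items = (innerB pairs).1 := by
  unfold innerA innerB
  simp only []
  rw [PySem.List.foldl_prod_mk
        (fun (d : PySem.Dict String (PySem.Set String)) (pr : String × String) => d.modify pr.2 PySem.Set.empty (fun s => PySem.Set.add s (canonPart pr.1)))
        (fun (d : PySem.Dict String (PySem.Set String)) (pr : String × String) => d.modify (canonPart pr.1) PySem.Set.empty (fun s => PySem.Set.add s pr.2))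
        pairs PySem.Dict.empty PySem.Dict.empty]
  rw [items_foldl_modify_setadd (fun pr => pr.2) (fun pr => canonPart pr.1) pairs]
  simp [PySem.List.dedup_eq_ofList, List.map_map, List.filter_map, Function.comp_def]

theorem innerA_snd_items (pairs : List (String × String)) : (innerA pairs).2.items = (innerB pairs).2 := by
  unfold innerA innerB
  simp only []
  rw [PySem.List.foldl_prod_mk
        (fun (d : PySem.Dict String (PySem.Set String)) (pr : String × String) => d.modify pr.2 PySem.Set.empty (fun s => PySem.Set.add s (canonPart pr.1)))
        (fun (d : PySem.Dict String (PySem.Set String)) (pr : String × String) => d.modify (canonPart pr.1) PySem.Set.empty (fun s => PySem.Set.add s pr.2))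
        pairs PySem.Dict.empty PySem.Dict.empty]
  rw [items_foldl_modify_setadd (fun pr => canonPart pr.1) (fun pr => pr.2) pairs]
  simp [PySem.List.dedup_eq_ofList, List.map_map, List.filter_map, Function.comp_def]

-- ===== VERDICT (by name: the statement is the Claim_ definition above) =====
theorem compute_region_part_maps_spec : Claim_equal_compute_region_part_maps := by
  intro pts _
  unfold Spec_compute_region_part_maps compute_region_part_maps compute_region_part_maps_alt
  have hstep : (fun (st : PySem.Dict String (List (String × List String)) × PySem.Dict String (List (String × List String))) (vp : String × List (String × String)) =>
      let m := innerA vp.2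
      (st.1.insert vp.1 m.1.items, st.2.insert vp.1 m.2.items))
    = (fun st vp =>
      let m := innerB vp.2
      (st.1.insert vp.1 m.1, st.2.insert vp.1 m.2)) := by
    funext st vp
    simp only [innerA_fst_items, innerA_snd_items]
  rw [hstep]
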